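-- pv_equiv track=rewrite | github.com/eliottcassidy2000/math | 03-artifacts/code/tournament_fast.py | has_anti_automorphism
-- ===== SOURCE A (Python) =====
-- def is_score_palindromic(T):
--     """Check if score sequence is self-complementary (s_i + s_{n-1-i} = n-1).
--     NECESSARY condition for self-converse. O(n log n)."""
--     n = len(T)
--     scores = sorted(sum(T[i]) for i in range(n))
--     return all(scores[i] + scores[n - 1 - i] == n - 1 for i in range(n // 2))
--
-- def has_anti_automorphism(T):
--     """Check if T has ANY anti-automorphism (= is self-converse).
--     Uses score pre-filter + backtracking search over involutions.
--     By THM-024, if an anti-aut exists, an involution anti-aut exists.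
--
--     Faster than canonical form comparison for most tournaments because:
--     1. Score pre-filter eliminates ~70-90% of non-SC tournaments in O(n log n)
--     2. Involution search has smaller branching factor than full S_n search
--
--     Returns: (is_sc, anti_aut_or_None)
--     """
--     n = len(T)
--     if not is_score_palindromic(T):
--         return False, None
--
--     scores = [sum(T[i]) for i in range(n)]
--
--     # Group vertices by score
--     score_groups = {}
--     for v in range(n):
--         s = scores[v]
--         if s not in score_groups:
--             score_groups[s] = []
--         score_groups[s].append(v)
--
--     # An anti-aut maps vertex with score s to vertex with score (n-1-s)
--     # Try to build a mapping via backtracking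
--     mapping = [None] * n
--     used = [False] * n
--
--     def backtrack(idx):
--         if idx == n:
--             # Verify full anti-aut
--             for i in range(n):
--                 for j in range(i + 1, n):
--                     if T[mapping[i]][mapping[j]] != (1 - T[i][j]):
--                         return False
--             return True
--
--         if mapping[idx] is not None:
--             return backtrack(idx + 1)
--
--         s = scores[idx]
--         target_score = n - 1 - s
--         if target_score not in score_groups:
--             return False
--
--         for v in score_groups[target_score]:
--             if used[v]:
--                 continue
--             # Quick compatibility check
--             compatible = True
--             for prev in range(idx):
--                 if mapping[prev] is not None:
--                     # T[idx][prev] should map to 1 - T[mapping[idx]][mapping[prev]]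
--                     if T[mapping[idx] if mapping[idx] is not None else -1][mapping[prev]] != (1 - T[idx][prev]):
--                         # Wait, mapping[idx] is being set to v
--                         pass
--             # Actually set it and check constraints
--             mapping[idx] = v
--             used[v] = True
--
--             # Check all previously assigned pairs
--             ok = True
--             for prev in range(idx):
--                 if mapping[prev] is not None:
--                     if T[v][mapping[prev]] != (1 - T[idx][prev]):
--                         ok = False
--                         break
--             if ok and backtrack(idx + 1):
--                 return True
--
--             mapping[idx] = None
--             used[v] = False
--
--         return False
--
--     if backtrack(0):
--         return True, tuple(mapping)
--     return False, None
-- ===== SOURCE B (Python) =====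
-- def has_anti_automorphism(T):
--     """Check if T has ANY anti-automorphism (= is self-converse).
--
--     Same score pre-filter, but the involution-style backtracking search is
--     rewritten as an explicit iterative DFS: a manual stack of frames, one
--     frame per assigned position, each holding the untried candidates of the
--     same score group.  Returns: (is_sc, anti_aut_or_None).
--     """
--     n = len(T)
--     scores = [sum(row) for row in T]
--     ss = sorted(scores)
--     if any(ss[i] + ss[n - 1 - i] != n - 1 for i in range(n // 2)):
--         return False, None
--
--     groups = {}
--     for v in range(n):
--         groups.setdefault(scores[v], []).append(v)
--
--     if n == 0:
--         return True, ()
--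
--     mapping = [None] * n
--     used = [False] * n
--     # stack[-1] holds the untried candidates for position len(stack)-1
--     stack = [list(groups.get(n - 1 - scores[0], []))]
--     while stack:
--         pos = len(stack) - 1
--         if mapping[pos] is not None:          # back from a failed subtree: unassign
--             used[mapping[pos]] = False
--             mapping[pos] = None
--         cands = stack[-1]
--         if not cands:
--             stack.pop()
--             continue
--         v = cands.pop(0)
--         if used[v]:
--             continue
--         if any(T[v][mapping[p]] != 1 - T[pos][p] for p in range(pos)):
--             continue
--         mapping[pos] = v
--         used[v] = True
--         if pos + 1 == n:
--             if all(T[mapping[i]][mapping[j]] == 1 - T[i][j]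
--                    for i in range(n) for j in range(i + 1, n)):
--                 return True, tuple(mapping)
--             continue
--         stack.append(list(groups.get(n - 1 - scores[pos + 1], [])))
--     return False, None
-- ===== Notes on version B (the rewrite author's own statement) =====
-- stated objective: alternative
-- what changed: The recursive involution backtracking (nested Python recursion backtrack(idx) with a for-loop over candidates) is replaced by an explicit iterative depth-first search driven by a manual stack of frames, each frame holding the untried same-score candidates for its position; same score pre-filter, same candidate order, so the first anti-automorphism found is identical.
-- outside the precondition, e.g. on has_anti_automorphism([[0], [-7], [9]]): A returns (False, None), B returns (False, None)
import Mathlib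
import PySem

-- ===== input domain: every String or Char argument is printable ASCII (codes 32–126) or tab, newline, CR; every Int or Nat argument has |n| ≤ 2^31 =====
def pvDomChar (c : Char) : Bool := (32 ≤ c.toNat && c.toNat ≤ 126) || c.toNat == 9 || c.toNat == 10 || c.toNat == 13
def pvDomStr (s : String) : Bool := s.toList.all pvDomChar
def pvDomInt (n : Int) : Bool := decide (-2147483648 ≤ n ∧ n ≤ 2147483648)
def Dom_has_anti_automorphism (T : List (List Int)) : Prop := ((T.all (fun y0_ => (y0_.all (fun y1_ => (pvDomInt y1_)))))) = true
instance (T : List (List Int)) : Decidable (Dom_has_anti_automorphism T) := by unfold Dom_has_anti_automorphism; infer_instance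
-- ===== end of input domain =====

-- B rewrites A's recursive involution backtracking as an explicit iterative DFS over a
-- manual stack of frames (objective: alternative decomposition, same candidate order).

-- ===== PORT A =====

-- T[i][j] for indices that are in range and nonnegative under Pre_ (all ports only
-- index with values from range(n) / group members, which are nonnegative).
def pvTAt (T : List (List Int)) (i j : Int) : Int := (T.getD i.toNat []).getD j.toNat 0

-- scores = [sum(T[i]) for i in range(n)]
def pvScoresA (T : List (List Int)) : List Int :=
  (List.range T.length).map (fun i => (T.getD i []).sum)

-- helper is_score_palindromic of A
def is_score_palindromic_port (T : List (List Int)) : Bool :=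
  let n := T.length
  let ss := PySem.List.sorted (pvScoresA T) (fun x => x) false
  (List.range (n / 2)).all (fun i => ss.getD i 0 + ss.getD (n - 1 - i) 0 == (n : Int) - 1)

-- score_groups built by: if s not in score_groups: score_groups[s] = []; score_groups[s].append(v)
def pvGroupsA (n : Nat) (scores : List Int) : PySem.Dict Int (List Int) :=
  (List.range n).foldl
    (fun d v =>
      let s := scores.getD v 0
      let d1 := if d.contains s then d else d.insert s []
      d1.modify s [] (fun g => g ++ [(v : Int)]))
    PySem.Dict.empty

-- the `ok` check: for prev in range(idx): if mapping[prev] is not None: T[v][mapping[prev]] == 1 - T[idx][prev]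
def pvCheckA (T : List (List Int)) (v : Int) (idx : Nat) (mapping : List (Option Int)) : Bool :=
  (List.range idx).all (fun p =>
    match mapping.getD p none with
    | none => true
    | some mp => pvTAt T v mp == 1 - pvTAt T (idx : Int) (p : Int))

-- the full verification at idx == n
def pvVerifyA (T : List (List Int)) (n : Nat) (mapping : List (Option Int)) : Bool :=
  (List.range n).all (fun i =>
    (PySem.List.pyRange ((i : Int) + 1) (n : Int) 1).all (fun j =>
      pvTAt T ((mapping.getD i none).getD 0) ((mapping.getD j.toNat none).getD 0)
        == 1 - pvTAt T (i : Int) j))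

-- candidate loop `for v in score_groups[target_score]` of backtrack(idx);
-- `next` is backtrack(idx+1) (the dead `compatible` loop of A only evaluates and
-- discards values — it has no effect and cannot raise under Pre_ — so it has no port)
def pvTryA (T : List (List Int)) (idx : Nat)
    (next : List (Option Int) → List Bool → Option (List (Option Int))) :
    List Int → List (Option Int) → List Bool → Option (List (Option Int))
  | [], _, _ => none
  | v :: cs, mapping, used =>
    if used.getD v.toNat false then pvTryA T idx next cs mapping used
    else
      let mapping' := mapping.set idx (some v)
      let used' := used.set v.toNat true
      if pvCheckA T v idx mapping' then
        match next mapping' used' with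
        | some m => some m
        | none => pvTryA T idx next cs mapping used
      else pvTryA T idx next cs mapping used

-- backtrack(idx); the first argument is the structural fuel n - idx (idx == n ↔ fuel 0)
def pvBtA (T : List (List Int)) (n : Nat) (scores : List Int)
    (groups : PySem.Dict Int (List Int)) :
    Nat → Nat → List (Option Int) → List Bool → Option (List (Option Int))
  | 0, _, mapping, _ => if pvVerifyA T n mapping then some mapping else none
  | d + 1, idx, mapping, used =>
    if (mapping.getD idx none).isSome then pvBtA T n scores groups d (idx + 1) mapping used
    else
      match groups.get? ((n : Int) - 1 - scores.getD idx 0) with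
      | none => none
      | some g => pvTryA T idx (fun m u => pvBtA T n scores groups d (idx + 1) m u) g mapping used

def has_anti_automorphism (T : List (List Int)) : Bool × Option (List Int) :=
  let n := T.length
  if !is_score_palindromic_port T then (false, none)
  else
    let scores := pvScoresA T
    let groups := pvGroupsA n scores
    match pvBtA T n scores groups n 0 (List.replicate n none) (List.replicate n false) with
    | some m => (true, some (m.map (fun o => o.getD 0)))
    | none => (false, none)

-- ===== PORT B =====

-- scores = [sum(row) for row in T]
def pvScoresB (T : List (List Int)) : List Int := T.map List.sum

-- groups built by groups.setdefault(scores[v], []).append(v)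
def pvGroupsB (n : Nat) (scores : List Int) : PySem.Dict Int (List Int) :=
  (List.range n).foldl
    (fun d v =>
      let s := scores.getD v 0
      (d.setdefault s []).modify s [] (fun g => g ++ [(v : Int)]))
    PySem.Dict.empty

-- any(T[v][mapping[p]] != 1 - T[pos][p] for p in range(pos))
def pvCheckB (T : List (List Int)) (v : Int) (pos : Nat) (mapping : List (Option Int)) : Bool :=
  (List.range pos).any (fun p =>
    !(pvTAt T v ((mapping.getD p none).getD 0) == 1 - pvTAt T (pos : Int) (p : Int)))

-- all(T[mapping[i]][mapping[j]] == 1 - T[i][j] for i in range(n) for j in range(i+1, n))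
def pvFullB (T : List (List Int)) (n : Nat) (mapping : List (Option Int)) : Bool :=
  (List.range n).all (fun i =>
    (PySem.List.pyRange ((i : Int) + 1) (n : Int) 1).all (fun j =>
      pvTAt T ((mapping.getD i none).getD 0) ((mapping.getD j.toNat none).getD 0)
        == 1 - pvTAt T (i : Int) j))

-- `if mapping[pos] is not None: used[mapping[pos]] = False; mapping[pos] = None`
def pvUnassign (pos : Nat) (mapping : List (Option Int)) (used : List Bool) :
    List (Option Int) × List Bool :=
  match mapping.getD pos none with
  | some m => (mapping.set pos none, used.set m.toNat false)
  | none => (mapping, used)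

-- termination measure helpers (proof-only artefacts of the well-founded recursion)
def pvMaxFrame (groups : PySem.Dict Int (List Int)) : Nat :=
  (groups.values.map List.length).foldr max 0

def pvLoopMeas (W : Nat) : Nat → List (List Int) → Nat
  | _, [] => 0
  | e, c :: rest => (c.length + 1) * W ^ e + pvLoopMeas W (e + 1) rest

theorem pvLoopMeas_mono (W : Nat) (hW : 1 ≤ W) :
    ∀ (s : List (List Int)) (e e' : Nat), e ≤ e' → pvLoopMeas W e s ≤ pvLoopMeas W e' s := by
  intro s
  induction s with
  | nil => intro e e' _; simp [pvLoopMeas]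
  | cons c rest ih =>
    intro e e' h
    simp only [pvLoopMeas]
    have h1 : W ^ e ≤ W ^ e' := Nat.pow_le_pow_right hW h
    have h2 := ih (e + 1) (e' + 1) (by omega)
    have := Nat.mul_le_mul_left (c.length + 1) h1
    omega

theorem pvMaxFrame_lt (groups : PySem.Dict Int (List Int)) (t : Int) :
    (groups.getD t []).length + 1 < pvMaxFrame groups + 2 := by
  rcases hg : groups.get? t with _ | g
  · rw [PySem.Dict.getD_of_get?_eq_none groups [] hg]; simp
  · rw [PySem.Dict.getD_of_get?_eq_some groups [] hg]
    have hmem : g ∈ groups.values := by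
      have := PySem.Dict.mem_items_of_get?_eq_some groups hg
      simp only [PySem.Dict.values]
      exact List.mem_map.2 ⟨(t, g), this, rfl⟩
    have hlen : g.length ∈ groups.values.map List.length := List.mem_map.2 ⟨g, hmem, rfl⟩
    have : ∀ (l : List Nat) (x : Nat), x ∈ l → x ≤ l.foldr max 0 := by
      intro l
      induction l with
      | nil => intro x hx; cases hx
      | cons a l ih =>
        intro x hx
        rcases List.mem_cons.1 hx with h | h
        · subst h; simp only [List.foldr]; omega
        · have := ih x h; simp only [List.foldr]; omega
    have := this _ _ hlen
    unfold pvMaxFrame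
    omega

theorem pvMeas_lt_tail (W e : Nat) (hW : 1 ≤ W) (v : Int) (cs : List Int) (rest : List (List Int)) :
    pvLoopMeas W e (cs :: rest) < pvLoopMeas W e ((v :: cs) :: rest) := by
  simp only [pvLoopMeas, List.length_cons]
  have : 0 < W ^ e := Nat.pow_pos (by omega : 0 < W)
  nlinarith [pvLoopMeas_mono W hW rest (e+1) (e+1) (le_refl _)]

theorem pvMeas_lt_pop (W n : Nat) (hW : 1 ≤ W) (c : List Int) (rest : List (List Int)) :
    pvLoopMeas W (n + 1 - rest.length) rest <
      pvLoopMeas W (n + 1 - (c :: rest).length) (c :: rest) := by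
  simp only [pvLoopMeas, List.length_cons]
  have h1 : pvLoopMeas W (n + 1 - rest.length) rest ≤
      pvLoopMeas W (n + 1 - (rest.length + 1) + 1) rest :=
    pvLoopMeas_mono W hW rest _ _ (by omega)
  have h2 : 0 < W ^ (n + 1 - (rest.length + 1)) := Nat.pow_pos (by omega : 0 < W)
  have h3 : W ^ (n + 1 - (rest.length + 1)) ≤ (c.length + 1) * W ^ (n + 1 - (rest.length + 1)) :=
    Nat.le_mul_of_pos_left _ (by omega)
  omega

theorem pvMeas_lt_push (W n : Nat) (hW : 2 ≤ W) (g : List Int) (hg : g.length + 1 < W)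
    (v : Int) (cs : List Int) (rest : List (List Int)) (hL : rest.length + 1 < n) :
    pvLoopMeas W (n + 1 - (g :: cs :: rest).length) (g :: cs :: rest) <
      pvLoopMeas W (n + 1 - ((v :: cs) :: rest).length) ((v :: cs) :: rest) := by
  simp only [pvLoopMeas, List.length_cons]
  have he : n + 1 - (rest.length + 1 + 1) + 1 = n + 1 - (rest.length + 1) := by omega
  rw [he]
  have hpow : (g.length + 1) * W ^ (n + 1 - (rest.length + 1 + 1)) <
      W ^ (n + 1 - (rest.length + 1)) := by
    have h2 : n + 1 - (rest.length + 1) = (n + 1 - (rest.length + 1 + 1)) + 1 := by omega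
    rw [h2, pow_succ]
    have : 0 < W ^ (n + 1 - (rest.length + 1 + 1)) := Nat.pow_pos (by omega : 0 < W)
    calc (g.length + 1) * W ^ (n + 1 - (rest.length + 1 + 1))
        < W * W ^ (n + 1 - (rest.length + 1 + 1)) := by
          exact Nat.mul_lt_mul_of_lt_of_le hg (le_refl _) this
      _ = W ^ (n + 1 - (rest.length + 1 + 1)) * W := by ring
  have : 0 < W ^ (n + 1 - (rest.length + 1)) := Nat.pow_pos (by omega : 0 < W)
  nlinarith [pvLoopMeas_mono W (by omega) rest (n + 1 - (rest.length + 1) + 1)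
      (n + 1 - (rest.length + 1) + 1) (le_refl _)]

-- the main `while stack:` loop of Source B (one recursive call per iteration)
def pvLoopB (T : List (List Int)) (n : Nat) (scores : List Int)
    (groups : PySem.Dict Int (List Int)) :
    List (List Int) → List (Option Int) → List Bool → Bool × Option (List Int)
  | [], _, _ => (false, none)
  | cands :: rest, mapping, used =>
    let pos := rest.length
    let mapping1 := (pvUnassign pos mapping used).1
    let used1 := (pvUnassign pos mapping used).2
    match cands with
    | [] => pvLoopB T n scores groups rest mapping1 used1
    | v :: cs =>
      if used1.getD v.toNat false then pvLoopB T n scores groups (cs :: rest) mapping1 used1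
      else if pvCheckB T v pos mapping1 then pvLoopB T n scores groups (cs :: rest) mapping1 used1
      else
        let mapping' := mapping1.set pos (some v)
        let used' := used1.set v.toNat true
        if n ≤ pos + 1 then
          if pvFullB T n mapping' then (true, some (mapping'.map (fun o => o.getD 0)))
          else pvLoopB T n scores groups (cs :: rest) mapping' used'
        else
          pvLoopB T n scores groups
            ((groups.getD ((n : Int) - 1 - scores.getD (pos + 1) 0) []) :: cs :: rest)
            mapping' used'
termination_by stack _ _ => pvLoopMeas (pvMaxFrame groups + 2) (n + 1 - stack.length) stack
decreasing_by
  · exact pvMeas_lt_pop _ _ (by omega) _ _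
  · exact pvMeas_lt_tail _ _ (by omega) _ _ _
  · exact pvMeas_lt_tail _ _ (by omega) _ _ _
  · exact pvMeas_lt_tail _ _ (by omega) _ _ _
  · exact pvMeas_lt_push _ _ (by omega) _ (pvMaxFrame_lt groups _) _ _ _ (by omega)

def has_anti_automorphism_alt (T : List (List Int)) : Bool × Option (List Int) :=
  let n := T.length
  let scores := pvScoresB T
  let ss := PySem.List.sorted scores (fun x => x) false
  if (List.range (n / 2)).any
      (fun i => !(ss.getD i 0 + ss.getD (n - 1 - i) 0 == (n : Int) - 1)) then (false, none)
  else
    let groups := pvGroupsB n scores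
    if n = 0 then (true, some [])
    else
      pvLoopB T n scores groups
        [groups.getD ((n : Int) - 1 - scores.getD 0 0) []]
        (List.replicate n none) (List.replicate n false)

-- ===== PRECONDITION & SPEC =====

-- Pre_ excludes inputs whose rows are shorter than len(T) while the sorted row sums are
-- score-palindromic: there A's backtracking search may index past the end of a row and
-- raise IndexError (on a few such inputs the search happens to stop before indexing and
-- A still returns (False, None); B returns the same value there, see the cite).
def Pre_has_anti_automorphism (T : List (List Int)) : Prop :=
  (∀ row ∈ T, T.length ≤ row.length) ∨
  ¬ ((List.range (T.length / 2)).all (fun i =>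
        (PySem.List.sorted (T.map List.sum) (fun x => x) false).getD i 0 +
          (PySem.List.sorted (T.map List.sum) (fun x => x) false).getD (T.length - 1 - i) 0
          == (T.length : Int) - 1) = true)
instance (T : List (List Int)) : Decidable (Pre_has_anti_automorphism T) := by
  unfold Pre_has_anti_automorphism; infer_instance

def pvWitness_has_anti_automorphism : List (List Int) := [[0, 1, 0], [0, 0, 1], [1, 0, 0]]

def Spec_has_anti_automorphism (T : List (List Int)) (out : Bool × Option (List Int)) : Prop :=
  out = has_anti_automorphism_alt T
instance (T : List (List Int)) (out : Bool × Option (List Int)) :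
    Decidable (Spec_has_anti_automorphism T out) := by
  unfold Spec_has_anti_automorphism; infer_instance

-- ===== CLAIM (what is proved, stated in full; the proofs are below) =====
def Claim_equal_has_anti_automorphism : Prop :=
  ∀ (T : List (List Int)), Dom_has_anti_automorphism T → Pre_has_anti_automorphism T →
    Spec_has_anti_automorphism T (has_anti_automorphism T)

-- ===== LEMMAS AND PROOFS =====

-- generic list helpers
theorem pvGetD_set_self {α : Type} (l : List α) (i : Nat) (a d : α) (h : i < l.length) :
    (l.set i a).getD i d = a := by
  rw [List.getD_eq_getElem?_getD, List.getElem?_set_self', List.getElem?_eq_getElem h]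
  rfl

theorem pvGetD_set_ne {α : Type} (l : List α) (i j : Nat) (a d : α) (h : i ≠ j) :
    (l.set i a).getD j d = l.getD j d := by
  rw [List.getD_eq_getElem?_getD, List.getElem?_set_ne h, ← List.getD_eq_getElem?_getD]

theorem pvSet_eq_self {α : Type} (l : List α) (i : Nat) (d x : α) (hi : i < l.length)
    (h : l.getD i d = x) : l.set i x = l := by
  have hx : l[i]? = some x := by
    rw [List.getElem?_eq_getElem hi]
    rw [List.getD_eq_getElem?_getD, List.getElem?_eq_getElem hi] at h
    simpa using h
  apply List.ext_getElem?
  intro j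
  by_cases hj : j = i
  · subst hj; rw [List.getElem?_set_self']; simp [hx]
  · rw [List.getElem?_set_ne (by omega)]

theorem pvAll_congr {α : Type} (l : List α) (p q : α → Bool) (h : ∀ x ∈ l, p x = q x) :
    l.all p = l.all q := by
  induction l with
  | nil => rfl
  | cons a l ih =>
    simp only [List.all_cons, h a (by simp), ih (fun x hx => h x (by simp [hx]))]

-- the incremental checks of the two programs agree once mapping[idx] := v is set
theorem pvCheckAB (T : List (List Int)) (v : Int) (idx : Nat) (mapping : List (Option Int))
    (hs : ∀ j, j < idx → (mapping.getD j none).isSome) :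
    pvCheckA T v idx (mapping.set idx (some v)) = !pvCheckB T v idx mapping := by
  unfold pvCheckA pvCheckB
  rw [← List.not_all_eq_any_not, Bool.not_not]
  apply pvAll_congr
  intro p hp
  have hplt : p < idx := List.mem_range.mp hp
  have hsp := hs p hplt
  rcases hx : mapping.getD p none with _ | mp
  · rw [hx] at hsp; simp at hsp
  · rw [pvGetD_set_ne mapping idx p (some v) none (by omega), hx]
    rfl

theorem pvFull_eq : pvFullB = pvVerifyA := rfl

theorem pvUnassign_none (pos : Nat) (m : List (Option Int)) (u : List Bool)
    (h : m.getD pos none = none) : pvUnassign pos m u = (m, u) := by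
  rw [List.getD_eq_getElem?_getD] at h
  unfold pvUnassign
  rw [List.getD_eq_getElem?_getD, h]

theorem pvUnassign_some (pos : Nat) (m : List (Option Int)) (u : List Bool) (x : Int)
    (h : m.getD pos none = some x) :
    pvUnassign pos m u = (m.set pos none, u.set x.toNat false) := by
  rw [List.getD_eq_getElem?_getD] at h
  unfold pvUnassign
  rw [List.getD_eq_getElem?_getD, h]

theorem pvLoopB_congr (T : List (List Int)) (n : Nat) (scores : List Int)
    (groups : PySem.Dict Int (List Int)) (c : List Int) (rest : List (List Int))
    (m1 m2 : List (Option Int)) (u1 u2 : List Bool)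
    (h : pvUnassign rest.length m1 u1 = pvUnassign rest.length m2 u2) :
    pvLoopB T n scores groups (c :: rest) m1 u1 = pvLoopB T n scores groups (c :: rest) m2 u2 := by
  rw [pvLoopB.eq_def, pvLoopB.eq_def]
  simp only []
  rw [h]

-- the two group dictionaries coincide
theorem pvGroups_eq (n : Nat) (scores : List Int) : pvGroupsA n scores = pvGroupsB n scores := by
  unfold pvGroupsA pvGroupsB
  congr 1
  funext d v
  show (if d.contains (scores.getD v 0) then d else d.insert (scores.getD v 0) []).modify
      (scores.getD v 0) [] (fun g => g ++ [(v : Int)])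
    = (d.setdefault (scores.getD v 0) []).modify (scores.getD v 0) [] (fun g => g ++ [(v : Int)])
  by_cases hc : d.contains (scores.getD v 0)
  · rw [PySem.Dict.setdefault_of_contains d [] hc]
    simp only [hc, if_true]
  · rw [PySem.Dict.setdefault_of_not_contains d [] (by simpa using hc)]
    simp only [Bool.not_eq_true] at hc
    simp only [hc]
    simp

-- every vertex stored in a score group lies in range(n)
theorem pvGroupsB_mem_aux (n : Nat) (scores : List Int) :
    ∀ (l : List Nat) (d : PySem.Dict Int (List Int)),
      (∀ s, ∀ v ∈ d.getD s [], 0 ≤ v ∧ v.toNat < n) →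
      (∀ x ∈ l, x < n) →
      ∀ (s : Int), ∀ v ∈ (l.foldl
          (fun d v =>
            let s := scores.getD v 0
            (d.setdefault s []).modify s [] (fun g => g ++ [(v : Int)]))
          d).getD s [], 0 ≤ v ∧ v.toNat < n := by
  intro l
  induction l with
  | nil => intro d hd _ s v hv; exact hd s v hv
  | cons x l ih =>
    intro d hd hl
    simp only [List.foldl_cons]
    apply ih
    · intro s v hv
      by_cases hsx : s = scores.getD x 0
      · subst hsx
        rw [PySem.Dict.getD_modify_self] at hv
        rw [PySem.Dict.getD_setdefault_self] at hv
        rcases List.mem_append.1 hv with h | h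
        · exact hd _ v h
        · have : v = (x : Int) := by simpa using h
          subst this
          refine ⟨by positivity, ?_⟩
          simpa using hl x (by simp)
      · rw [PySem.Dict.getD_modify_of_ne _ _ _ hsx] at hv
        rw [PySem.Dict.getD_eq_get?_getD, PySem.Dict.get?_setdefault_of_ne _ _ hsx,
          ← PySem.Dict.getD_eq_get?_getD] at hv
        exact hd s v hv
    · intro y hy; exact hl y (by simp [hy])

theorem pvGroupsB_mem (n : Nat) (scores : List Int) :
    ∀ (s : Int), ∀ v ∈ (pvGroupsB n scores).getD s [], 0 ≤ v ∧ v.toNat < n := by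
  unfold pvGroupsB
  apply pvGroupsB_mem_aux
  · intro s v hv
    rw [PySem.Dict.getD_empty] at hv
    cases hv
  · intro x hx; exact List.mem_range.mp hx

-- the scores lists of the two programs coincide
theorem pvScores_eq (T : List (List Int)) : pvScoresA T = pvScoresB T := by
  unfold pvScoresA pvScoresB
  apply List.ext_getElem
  · simp
  · intro i h1 h2
    simp only [List.getElem_map, List.getElem_range]
    rw [List.getD_eq_getElem?_getD, List.getElem?_eq_getElem (by simpa using h2 : i < T.length)]
    rfl

-- main simulation: B's stack loop computes A's candidate loop at position idx
theorem pvSim (T : List (List Int)) (n : Nat) (scores : List Int)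
    (groups : PySem.Dict Int (List Int))
    (HG : ∀ (s : Int), ∀ v ∈ groups.getD s [], 0 ≤ v ∧ v.toNat < n)
    (d idx : Nat) (hd : n - idx = d + 1)
    (cands : List Int) (rest : List (List Int)) (mapping : List (Option Int)) (used : List Bool)
    (hrest : rest.length = idx)
    (hml : mapping.length = n) (hul : used.length = n)
    (hnone : ∀ j, idx ≤ j → mapping.getD j none = none)
    (hsome : ∀ j, j < idx → (mapping.getD j none).isSome)
    (hc : ∀ v ∈ cands, 0 ≤ v ∧ v.toNat < n) :
    pvLoopB T n scores groups (cands :: rest) mapping used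
      = match pvTryA T idx (fun m u => pvBtA T n scores groups (n - idx - 1) (idx + 1) m u)
          cands mapping used with
        | some m => (true, some (m.map (fun o => o.getD 0)))
        | none => pvLoopB T n scores groups rest mapping used := by
  have hidx : idx < n := by omega
  have hun : pvUnassign idx mapping used = (mapping, used) :=
    pvUnassign_none _ _ _ (hnone idx (le_refl idx))
  rw [pvLoopB.eq_def]
  simp only [hrest, hun]
  cases cands with
  | nil =>
    simp only [pvTryA]
  | cons v cs =>
    obtain ⟨hv0, hvn⟩ := hc v (List.mem_cons_self ..)
    have hvm : v.toNat < mapping.length := by omega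
    have hvu : v.toNat < used.length := by omega
    have hcs : ∀ w ∈ cs, 0 ≤ w ∧ w.toNat < n := fun w hw => hc w (by simp [hw])
    simp only [pvTryA]
    by_cases hu : used.getD v.toNat false
    · simp only [hu, if_true]
      exact pvSim T n scores groups HG d idx hd cs rest mapping used hrest hml hul hnone hsome hcs
    · simp only [Bool.not_eq_true] at hu
      simp only [hu, Bool.false_eq_true, if_false]
      have hcheckeq := pvCheckAB T v idx mapping hsome
      -- restoration of the search state after a failed subtree
      have hrestore :
          pvUnassign rest.length (mapping.set idx (some v)) (used.set v.toNat true)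
            = (mapping, used) := by
        rw [hrest,
          pvUnassign_some _ _ _ v (pvGetD_set_self mapping idx (some v) none (by omega))]
        refine Prod.ext ?_ ?_
        · show (mapping.set idx (some v)).set idx none = mapping
          rw [List.set_set]
          exact pvSet_eq_self mapping idx none none (by omega) (hnone idx (le_refl idx))
        · show (used.set v.toNat true).set v.toNat false = used
          rw [List.set_set]
          exact pvSet_eq_self used v.toNat false false hvu hu
      have hcongr : pvLoopB T n scores groups (cs :: rest)
            (mapping.set idx (some v)) (used.set v.toNat true)
          = pvLoopB T n scores groups (cs :: rest) mapping used :=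
        pvLoopB_congr T n scores groups cs rest _ _ _ _ (by rw [hrestore, hrest, hun])
      by_cases hcb : pvCheckB T v idx mapping
      · have hca : pvCheckA T v idx (mapping.set idx (some v)) = false := by
          rw [hcheckeq, hcb]; rfl
        simp only [hcb, hca, if_true, Bool.false_eq_true, if_false]
        exact pvSim T n scores groups HG d idx hd cs rest mapping used hrest hml hul hnone hsome hcs
      · simp only [Bool.not_eq_true] at hcb
        have hca : pvCheckA T v idx (mapping.set idx (some v)) = true := by
          rw [hcheckeq, hcb]; rfl
        simp only [hcb, hca, if_true, Bool.false_eq_true, if_false]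
        -- invariants at idx + 1
        have hml' : (mapping.set idx (some v)).length = n := by simp [hml]
        have hul' : (used.set v.toNat true).length = n := by simp [hul]
        have hnone' : ∀ j, idx + 1 ≤ j → (mapping.set idx (some v)).getD j none = none := by
          intro j hj
          rw [pvGetD_set_ne mapping idx j (some v) none (by omega)]
          exact hnone j (by omega)
        have hsome' : ∀ j, j < idx + 1 → ((mapping.set idx (some v)).getD j none).isSome := by
          intro j hj
          by_cases hje : j = idx
          · subst hje
            rw [pvGetD_set_self mapping j (some v) none (by omega)]
            rfl
          · rw [pvGetD_set_ne mapping idx j (some v) none (by omega)]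
            exact hsome j (by omega)
        by_cases hleaf : n ≤ idx + 1
        · have hd0 : n - idx - 1 = 0 := by omega
          have hrec := pvSim T n scores groups HG d idx hd cs rest mapping used hrest hml hul
            hnone hsome hcs
          have hbt : pvBtA T n scores groups (n - idx - 1) (idx + 1)
                (mapping.set idx (some v)) (used.set v.toNat true)
              = if pvVerifyA T n (mapping.set idx (some v)) then
                  some (mapping.set idx (some v)) else none := by
            rw [hd0]
            rfl
          rw [hbt, ← pvFull_eq]
          simp only [hleaf, if_true]
          by_cases hver : pvFullB T n (mapping.set idx (some v))
          · simp only [hver, if_true]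
          · simp only [hver, Bool.false_eq_true, if_false]
            rw [hcongr]
            exact hrec
        · have hnle : ¬ (n ≤ idx + 1) := hleaf
          have hnd : n - idx - 1 = (d - 1) + 1 := by omega
          have hm1 : (mapping.set idx (some v)).getD (idx + 1) none = none :=
            hnone' (idx + 1) (le_refl _)
          have hrec := pvSim T n scores groups HG d idx hd cs rest mapping used hrest hml hul
            hnone hsome hcs
          have hbt : pvBtA T n scores groups (n - idx - 1) (idx + 1)
                (mapping.set idx (some v)) (used.set v.toNat true)
              = match groups.get? ((n : Int) - 1 - scores.getD (idx + 1) 0) with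
                | none => none
                | some g =>
                    pvTryA T (idx + 1)
                      (fun m u => pvBtA T n scores groups (d - 1) (idx + 1 + 1) m u) g
                      (mapping.set idx (some v)) (used.set v.toNat true) := by
            rw [hnd]
            simp only [pvBtA, hm1, Option.isSome_none, Bool.false_eq_true, if_false]
          rw [hbt]
          simp only [hnle, if_false]
          rcases hg : groups.get? ((n : Int) - 1 - scores.getD (idx + 1) 0) with _ | g
          · have hgd : groups.getD ((n : Int) - 1 - scores.getD (idx + 1) 0) [] = [] :=
              PySem.Dict.getD_of_get?_eq_none groups [] hg
            rw [hgd]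
            rw [pvSim T n scores groups HG (d - 1) (idx + 1) (by omega) [] (cs :: rest)
              (mapping.set idx (some v)) (used.set v.toNat true)
              (by simp [hrest]) hml' hul' hnone' hsome' (by intro w hw; cases hw)]
            simp only [pvTryA]
            rw [hcongr]
            exact hrec
          · have hgd : groups.getD ((n : Int) - 1 - scores.getD (idx + 1) 0) [] = g :=
              PySem.Dict.getD_of_get?_eq_some groups [] hg
            have hgmem : ∀ w ∈ g, 0 ≤ w ∧ w.toNat < n := by
              intro w hw
              exact HG _ w (by rw [hgd]; exact hw)
            have hsub := pvSim T n scores groups HG (d - 1) (idx + 1) (by omega) g (cs :: rest)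
              (mapping.set idx (some v)) (used.set v.toNat true)
              (by simp [hrest]) hml' hul' hnone' hsome' hgmem
            have hnd2 : n - (idx + 1) - 1 = d - 1 := by omega
            rw [hnd2] at hsub
            rw [hgd, hsub]
            rcases htry : pvTryA T (idx + 1)
                (fun m u => pvBtA T n scores groups (d - 1) (idx + 1 + 1) m u) g
                (mapping.set idx (some v)) (used.set v.toNat true) with _ | m
            · simp only [htry]
              rw [hcongr]
              exact hrec
            · simp only [htry]
termination_by (d, cands.length)
decreasing_by
  all_goals simp_wf
  all_goals first
    | (apply Prod.Lex.left; omega)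
    | (apply Prod.Lex.right; subst cands; simp)

theorem pvRepl_getD {α : Type} (m j : Nat) (x : α) : (List.replicate m x).getD j x = x := by
  rcases lt_or_ge j m with h | h
  · exact List.getD_replicate x h
  · rw [List.getD_eq_default]; simpa using h

-- the top-level search call: A's backtrack(0) against B's initial one-frame stack
theorem pvTop (T : List (List Int)) (n : Nat) (scores : List Int)
    (groups : PySem.Dict Int (List Int))
    (HG : ∀ (s : Int), ∀ v ∈ groups.getD s [], 0 ≤ v ∧ v.toNat < n) (hn : 1 ≤ n) :
    (match pvBtA T n scores groups n 0 (List.replicate n none) (List.replicate n false) with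
      | some m => (true, some (m.map (fun o => o.getD 0)))
      | none => ((false : Bool), (none : Option (List Int))))
    = pvLoopB T n scores groups [groups.getD ((n : Int) - 1 - scores.getD 0 0) []]
        (List.replicate n none) (List.replicate n false) := by
  obtain ⟨k, rfl⟩ : ∃ k, n = k + 1 := ⟨n - 1, by omega⟩
  have hnone : ∀ j, 0 ≤ j → (List.replicate (k + 1) (none : Option Int)).getD j none = none :=
    fun j _ => pvRepl_getD (k + 1) j none
  have hsim := pvSim T (k + 1) scores groups HG k 0 (by omega)
    (groups.getD (((k + 1 : Nat) : Int) - 1 - scores.getD 0 0) []) []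
    (List.replicate (k + 1) none) (List.replicate (k + 1) false)
    rfl (by simp) (by simp) hnone (by intro j hj; omega)
    (fun w hw => HG _ w hw)
  rw [hsim]
  have hbt : pvBtA T (k + 1) scores groups (k + 1) 0
        (List.replicate (k + 1) none) (List.replicate (k + 1) false)
      = match groups.get? (((k + 1 : Nat) : Int) - 1 - scores.getD 0 0) with
        | none => none
        | some g =>
            pvTryA T 0 (fun m u => pvBtA T (k + 1) scores groups k 1 m u) g
              (List.replicate (k + 1) none) (List.replicate (k + 1) false) := by
    simp only [pvBtA, hnone 0 (le_refl 0), Option.isSome_none, Bool.false_eq_true, if_false]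
  rw [hbt]
  have hk10 : k + 1 - 0 - 1 = k := by omega
  rw [hk10]
  rcases hg : groups.get? (((k + 1 : Nat) : Int) - 1 - scores.getD 0 0) with _ | g
  · have hgd : groups.getD (((k + 1 : Nat) : Int) - 1 - scores.getD 0 0) [] = [] :=
      PySem.Dict.getD_of_get?_eq_none groups [] hg
    rw [hgd]
    simp only [pvTryA]
    rw [pvLoopB.eq_def]
  · have hgd : groups.getD (((k + 1 : Nat) : Int) - 1 - scores.getD 0 0) [] = g :=
      PySem.Dict.getD_of_get?_eq_some groups [] hg
    rw [hgd]
    rcases htry : pvTryA T 0 (fun m u => pvBtA T (k + 1) scores groups k 1 m u) g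
        (List.replicate (k + 1) none) (List.replicate (k + 1) false) with _ | m
    · simp only [htry]
      rw [pvLoopB.eq_def]
    · simp only [htry]

-- Source B's inline pre-filter condition is the negation of A's is_score_palindromic
theorem pvCond_eq (T : List (List Int)) :
    (List.range (T.length / 2)).any
      (fun i => !((PySem.List.sorted (pvScoresB T) (fun x => x) false).getD i 0 +
        (PySem.List.sorted (pvScoresB T) (fun x => x) false).getD (T.length - 1 - i) 0
        == (T.length : Int) - 1))
      = !is_score_palindromic_port T := by
  unfold is_score_palindromic_port
  rw [← List.not_all_eq_any_not, pvScores_eq T]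

-- when the score pre-filter rejects, both programs stop at once
theorem pv_prefilter_stops (T : List (List Int))
    (hpal : is_score_palindromic_port T = false) :
    has_anti_automorphism T = (false, none) ∧ has_anti_automorphism_alt T = (false, none) := by
  constructor
  · simp only [has_anti_automorphism, hpal, Bool.not_false, if_true]
  · simp only [has_anti_automorphism_alt]
    rw [pvCond_eq T, hpal]
    simp

theorem pv_main (T : List (List Int)) :
    has_anti_automorphism T = has_anti_automorphism_alt T := by
  by_cases hT : T = []
  · subst hT; decide
  · have hn : 1 ≤ T.length := by
      cases T with
      | nil => exact absurd rfl hT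
      | cons a l => simp
    have hscores := pvScores_eq T
    simp only [has_anti_automorphism, has_anti_automorphism_alt]
    rw [hscores, pvGroups_eq]
    rw [pvCond_eq T]
    by_cases hpal : is_score_palindromic_port T
    · simp only [hpal, Bool.not_true, Bool.false_eq_true, if_false]
      have h0 : ¬ (T.length = 0) := by omega
      simp only [h0, if_false]
      exact pvTop T T.length (pvScoresB T) (pvGroupsB T.length (pvScoresB T))
        (pvGroupsB_mem T.length (pvScoresB T)) hn
    · simp only [Bool.not_eq_true] at hpal
      simp only [hpal, Bool.not_false, if_true]

-- ===== VERDICT (by name: the statement is the Claim_ definition above) =====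
theorem has_anti_automorphism_spec : Claim_equal_has_anti_automorphism := by
  intro T _ hpre
  unfold Spec_has_anti_automorphism
  rcases hpre with hrows | hpal
  · -- rows long enough: the searches run index-safely and coincide step by step
    exact pv_main T
  · -- the score pre-filter rejects: both programs return (False, None) immediately
    have h2 : is_score_palindromic_port T = false := by
      unfold is_score_palindromic_port
      rw [pvScores_eq T]
      simp only [Bool.not_eq_true] at hpal
      exact hpal
    obtain ⟨ha, hb⟩ := pv_prefilter_stops T h2
    rw [ha, hb]
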